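-- pv_equiv track=rewrite | github.com/jiji-svg/coding_test | level1/day2/sportswear.py | solution
-- ===== SOURCE A (Python) =====
-- def solution(n, lost, reserve):
--     lost.sort()
--     reserve.sort()
--     lost2 = lost.copy()
--     reserve2 = reserve.copy()
--     answer = n - len(lost)
--     for l in lost:
--         if l in reserve:
--             reserve2.remove(l)
--             lost2.remove(l)
--             answer += 1
--     for l in lost2:
--         if l-1 in reserve2:
--             reserve2.remove(l-1)
--             answer += 1
--         elif l+1 in reserve2:
--             reserve2.remove(l+1)
--             answer += 1
--     return answer
-- ===== SOURCE B (Python) =====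
-- def solution(n, lost, reserve):
--     # A sorts its arguments in place; reproduce that observable mutation.
--     lost.sort()
--     reserve.sort()
--     lc = {}
--     for l in lost:
--         lc[l] = lc.get(l, 0) + 1
--     rc = {}
--     for r in reserve:
--         rc[r] = rc.get(r, 0) + 1
--     matched = 0
--     prev = None
--     carry_need = 0
--     carry_spare = 0
--     for v in sorted(set(lc) | set(rc)):
--         if prev is None or v - prev != 1:
--             carry_need = 0
--             carry_spare = 0
--         e = min(lc.get(v, 0), rc.get(v, 0))
--         nv = lc.get(v, 0) - e
--         sv = rc.get(v, 0) - e
--         matched += e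
--         t1 = min(carry_need, sv)
--         matched += t1
--         sv -= t1
--         t2 = min(nv, carry_spare)
--         matched += t2
--         nv -= t2
--         carry_need = nv
--         carry_spare = sv
--         prev = v
--     return n - len(lost) + matched
-- ===== Notes on version B (the rewrite author's own statement) =====
-- stated objective: faster
-- what changed: Replaces A's two staged per-student scans with list membership tests and list.remove (each a linear scan) by counting multiplicities once and making a single ascending sweep over the sorted distinct values with two carry counters (pending needy / leftover spare at the previous value), so no per-student inner scan remains.
-- outside the precondition, e.g. on solution(3, [1, 1], [1]): A raises ValueError, B returns 2
import Mathlib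
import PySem

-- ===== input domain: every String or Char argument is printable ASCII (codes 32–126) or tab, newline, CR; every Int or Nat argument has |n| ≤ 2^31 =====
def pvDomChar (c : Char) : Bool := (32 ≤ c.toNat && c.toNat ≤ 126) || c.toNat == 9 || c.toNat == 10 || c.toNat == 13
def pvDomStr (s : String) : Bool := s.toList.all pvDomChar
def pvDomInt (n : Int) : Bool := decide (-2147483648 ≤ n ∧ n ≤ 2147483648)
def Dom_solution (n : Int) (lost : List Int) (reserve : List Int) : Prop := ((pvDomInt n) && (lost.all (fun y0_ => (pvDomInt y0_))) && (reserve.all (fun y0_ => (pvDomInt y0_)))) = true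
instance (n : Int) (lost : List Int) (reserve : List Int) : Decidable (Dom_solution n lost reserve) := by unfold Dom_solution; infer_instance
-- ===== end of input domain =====

-- B replaces A's two staged scans with list.remove by ONE ascending sweep over the sorted
-- distinct values carrying two counters (pending needy / leftover spare at the previous value).
-- Equivalence is about the RETURN value; B performs the same in-place sorts of `lost`/`reserve` as A.

-- ===== PORT A =====
-- first loop of A: state (lost2, reserve2, answer); condition is membership in the ORIGINAL (sorted) reserve
def solLoop1 (reserve : List Int) : List Int → List Int → List Int → Int → List Int × List Int × Int
  | [], lost2, reserve2, ans => (lost2, reserve2, ans)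
  | l :: ls, lost2, reserve2, ans =>
    if l ∈ reserve then
      match PySem.List.remove? reserve2 l, PySem.List.remove? lost2 l with
      | some r2', some l2' => solLoop1 reserve ls l2' r2' (ans + 1)
      | _, _ => (lost2, reserve2, ans)  -- Python raises ValueError here; such inputs are outside Pre_solution
    else solLoop1 reserve ls lost2 reserve2 ans

-- second loop of A: state (reserve2, answer); both removes are guarded by membership, so remove? is some
def solLoop2 : List Int → List Int → Int → Int
  | [], _, ans => ans
  | l :: ls, reserve2, ans =>
    if (l - 1) ∈ reserve2 then
      solLoop2 ls ((PySem.List.remove? reserve2 (l - 1)).getD reserve2) (ans + 1)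
    else if (l + 1) ∈ reserve2 then
      solLoop2 ls ((PySem.List.remove? reserve2 (l + 1)).getD reserve2) (ans + 1)
    else solLoop2 ls reserve2 ans

def solution (n : Int) (lost : List Int) (reserve : List Int) : Int :=
  let lostS := PySem.List.sorted lost (fun x => x) false
  let reserveS := PySem.List.sorted reserve (fun x => x) false
  match solLoop1 reserveS lostS lostS reserveS (n - (lostS.length : Int)) with
  | (lost2, reserve2, answer) => solLoop2 lost2 reserve2 answer

-- ===== PORT B =====
-- one step of B's sweep at a distinct value v: keep the carries only when v is adjacent to prev,
-- cancel exact pairs (e), serve pending needy from v's spares (t1), serve v's needy from prev's spares (t2)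
def sweepStep (lc rc : PySem.Dict Int Int) (st : Option Int × Int × Int × Int) (v : Int) :
    Option Int × Int × Int × Int :=
  let cncs : Int × Int :=
    match st.1 with
    | none => (0, 0)
    | some p => if v - p ≠ 1 then (0, 0) else (st.2.1, st.2.2.1)
  let e := min (lc.getD v 0) (rc.getD v 0)
  let nv := lc.getD v 0 - e
  let sv := rc.getD v 0 - e
  let t1 := min cncs.1 sv
  let sv' := sv - t1
  let t2 := min nv cncs.2
  let nv' := nv - t2
  (some v, nv', sv', st.2.2.2 + e + t1 + t2)

def solution_alt (n : Int) (lost : List Int) (reserve : List Int) : Int :=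
  let lostS := PySem.List.sorted lost (fun x => x) false
  let reserveS := PySem.List.sorted reserve (fun x => x) false
  let lc := lostS.foldl (fun d l => d.insert l (d.getD l 0 + 1)) PySem.Dict.empty
  let rc := reserveS.foldl (fun d r => d.insert r (d.getD r 0 + 1)) PySem.Dict.empty
  let vals := PySem.List.sorted (PySem.Set.union lc.keys rc.keys) (fun x => x) false
  let fin := vals.foldl (sweepStep lc rc) (none, 0, 0, 0)
  n - (lostS.length : Int) + fin.2.2.2

-- ===== PRECONDITION & SPEC =====
-- Pre_ excludes exactly the inputs on which A raises ValueError: some value present in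
-- reserve occurs more often in lost than in reserve, so A's second reserve2.remove fails.
def Pre_solution (n : Int) (lost : List Int) (reserve : List Int) : Prop :=
  ∀ v ∈ reserve, lost.count v ≤ reserve.count v
instance (n : Int) (lost : List Int) (reserve : List Int) : Decidable (Pre_solution n lost reserve) := by unfold Pre_solution; infer_instance
def pvWitness_solution : Int × List Int × List Int := (5, [2, 4], [1, 3, 5])

def Spec_solution (n : Int) (lost : List Int) (reserve : List Int) (out : Int) : Prop := out = solution_alt n lost reserve
instance (n : Int) (lost : List Int) (reserve : List Int) (out : Int) : Decidable (Spec_solution n lost reserve out) := by unfold Spec_solution; infer_instance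

-- ===== CLAIM (what is proved, stated in full; the proofs are below) =====
def Claim_equal_solution : Prop := ∀ (n : Int) (lost : List Int) (reserve : List Int), Dom_solution n lost reserve → Pre_solution n lost reserve → Spec_solution n lost reserve (solution n lost reserve)

-- ===== LEMMAS AND PROOFS =====

-- function update, the abstract counter used throughout the proofs
def fupd (c : Int → Int) (x t : Int) : Int → Int := fun y => if y = x then t else c y

lemma fupd_self (c : Int → Int) (x t : Int) : fupd c x t x = t := by simp [fupd]

lemma fupd_ne (c : Int → Int) (x t y : Int) (h : y ≠ x) : fupd c x t y = c y := by
  simp [fupd, h]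

lemma fupd_id (c : Int → Int) (x : Int) : fupd c x (c x) = c := by
  funext y; by_cases h : y = x <;> simp [fupd, h]

lemma fupd_fupd (c : Int → Int) (x t t' : Int) : fupd (fupd c x t) x t' = fupd c x t' := by
  funext y; by_cases h : y = x <;> simp [fupd, h]

-- abstract form of A's second loop: per-student greedy on a count function (returns the match count)
def gLoop2 (c : Int → Int) : List Int → Int
  | [] => 0
  | l :: ls =>
    if 0 < c (l - 1) then 1 + gLoop2 (fupd c (l - 1) (c (l - 1) - 1)) ls
    else if 0 < c (l + 1) then 1 + gLoop2 (fupd c (l + 1) (c (l + 1) - 1)) ls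
    else gLoop2 c ls

-- abstract form of B's sweep on count functions N (needy) and S (spare)
def carries (pp : Option Int) (cn cs v : Int) : Int × Int :=
  match pp with
  | none => (0, 0)
  | some p => if v - p ≠ 1 then (0, 0) else (cn, cs)

def fStep (N S : Int → Int) (st : Option Int × Int × Int × Int) (v : Int) :
    Option Int × Int × Int × Int :=
  let cncs := carries st.1 st.2.1 st.2.2.1 v
  let e := min (N v) (S v)
  let nv := N v - e
  let sv := S v - e
  let t1 := min cncs.1 sv
  let t2 := min nv cncs.2
  (some v, nv - t2, sv - t1, st.2.2.2 + e + t1 + t2)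

def fSweep (N S : Int → Int) (vals : List Int) (st : Option Int × Int × Int × Int) :
    Option Int × Int × Int × Int :=
  vals.foldl (fStep N S) st

lemma fSweep_nil (N S : Int → Int) (st : Option Int × Int × Int × Int) :
    fSweep N S [] st = st := rfl

lemma fSweep_cons (N S : Int → Int) (v : Int) (vs : List Int)
    (st : Option Int × Int × Int × Int) :
    fSweep N S (v :: vs) st = fSweep N S vs (fStep N S st v) := rfl

lemma sweepStep_eq_fStep (lc rc : PySem.Dict Int Int) :
    sweepStep lc rc = fStep (fun v => lc.getD v 0) (fun v => rc.getD v 0) := by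
  funext st v
  cases st with
  | mk pp rest =>
    cases pp <;> simp [sweepStep, fStep, carries]

lemma fSweep_congr (N S N' S' : Int → Int) (vals : List Int)
    (h : ∀ v ∈ vals, N v = N' v ∧ S v = S' v) :
    ∀ st, fSweep N S vals st = fSweep N' S' vals st := by
  induction vals with
  | nil => intro st; rfl
  | cons v vs ih =>
    intro st
    have hv := h v (by simp)
    have hstep : fStep N S st v = fStep N' S' st v := by
      simp [fStep, hv.1, hv.2]
    rw [fSweep_cons, fSweep_cons, hstep]
    exact ih (fun w hw => h w (by simp [hw])) _

lemma fStep_m (N S : Int → Int) (pp : Option Int) (cn cs m v : Int) :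
    fStep N S (pp, cn, cs, m) v
      = ((fStep N S (pp, cn, cs, 0) v).1, (fStep N S (pp, cn, cs, 0) v).2.1,
         (fStep N S (pp, cn, cs, 0) v).2.2.1, m + (fStep N S (pp, cn, cs, 0) v).2.2.2) := by
  simp only [fStep]
  refine Prod.ext rfl (Prod.ext rfl (Prod.ext rfl ?_))
  ring

lemma fSweep_mshift (N S : Int → Int) (vals : List Int) :
    ∀ pp cn cs m, (fSweep N S vals (pp, cn, cs, m)).2.2.2
      = m + (fSweep N S vals (pp, cn, cs, 0)).2.2.2 := by
  induction vals with
  | nil => intro pp cn cs m; simp [fSweep_nil]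
  | cons v vs ih =>
    intro pp cn cs m
    rcases hst : fStep N S (pp, cn, cs, 0) v with ⟨p', a, b, e⟩
    rw [fSweep_cons, fSweep_cons, fStep_m, hst]
    simp only
    rw [ih p' a b (m + e), ih p' a b e]
    ring

lemma fSweep_esplit (N S : Int → Int) (hN : ∀ v, 0 ≤ N v) (hS : ∀ v, 0 ≤ S v)
    (vals : List Int) :
    ∀ pp cn cs m, (fSweep N S vals (pp, cn, cs, m)).2.2.2
      = (vals.map (fun v => min (N v) (S v))).sum
        + (fSweep (fun v => N v - min (N v) (S v)) (fun v => S v - min (N v) (S v)) vals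
            (pp, cn, cs, m)).2.2.2 := by
  induction vals with
  | nil => intro pp cn cs m; simp [fSweep_nil]
  | cons v vs ih =>
    intro pp cn cs m
    have he : min (N v - min (N v) (S v)) (S v - min (N v) (S v)) = 0 := by
      have := hN v; have := hS v; omega
    rw [fSweep_cons, fSweep_cons]
    simp only [fStep, he, sub_zero, List.map_cons, List.sum_cons]
    set q := carries pp cn cs v with hq
    set e0 := min (N v) (S v) with he0
    set t1 := min q.1 (S v - e0) with ht1
    set t2 := min (N v - e0) q.2 with ht2
    rw [ih (some v) (N v - e0 - t2) (S v - e0 - t1) (m + e0 + t1 + t2)]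
    rw [fSweep_mshift _ _ vs (some v) (N v - e0 - t2) (S v - e0 - t1) (m + e0 + t1 + t2),
        fSweep_mshift _ _ vs (some v) (N v - e0 - t2) (S v - e0 - t1) (m + 0 + t1 + t2)]
    ring

-- A sorted list whose elements are all = v or > v splits as (copies of v) ++ (elements > v)
lemma split_least : ∀ (L : List Int) (v : Int), L.Pairwise (· ≤ ·) →
    (∀ x ∈ L, x = v ∨ v < x) →
    L = List.replicate (L.count v) v ++ L.filter (fun x => decide (v < x)) := by
  intro L
  induction L with
  | nil => intro v _ _; simp
  | cons y tl ih =>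
    intro v hp hm
    rcases hm y (by simp) with hy | hy
    · subst hy
      have htl := (List.pairwise_cons.mp hp).2
      have hmt : ∀ x ∈ tl, x = y ∨ y < x := fun x hx => hm x (by simp [hx])
      rw [List.count_cons_self]
      simp only [List.filter_cons, show (decide (y < y)) = false by simp,
        List.replicate_succ, List.cons_append]
      exact congrArg (y :: ·) (ih y htl hmt)
    · have hlt : v < y := hy
      have hall : ∀ x ∈ y :: tl, v < x := by
        intro x hx
        rcases List.mem_cons.mp hx with rfl | hx'
        · exact hlt
        · have : y ≤ x := (List.pairwise_cons.mp hp).1 x hx'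
          omega
      have hcnt : (y :: tl).count v = 0 := by
        rw [List.count_eq_zero]
        intro hv
        exact absurd (hall v hv) (by omega)
      have hfil : (y :: tl).filter (fun x => decide (v < x)) = y :: tl :=
        List.filter_eq_self.mpr (fun x hx => by simpa using hall x hx)
      rw [hcnt, hfil]
      simp

-- a run of stuck students (both neighbours empty) contributes nothing
lemma gLoop2_skip (c : Int → Int) (x : Int) (h1 : ¬ 0 < c (x - 1)) (h2 : ¬ 0 < c (x + 1)) :
    ∀ (j : Nat) (rest : List Int), gLoop2 c (List.replicate j x ++ rest) = gLoop2 c rest := by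
  intro j
  induction j with
  | zero => intro rest; simp
  | succ j ih =>
    intro rest
    rw [List.replicate_succ, List.cons_append]
    simp only [gLoop2, if_neg h1, if_neg h2]
    exact ih rest

-- a run of k students at x first drains x-1: min(k, c(x-1)) of them match, the rest remain
lemma gLoop2_group1 : ∀ (k : Nat) (c : Int → Int) (x : Int) (rest : List Int),
    (∀ y, 0 ≤ c y) →
    gLoop2 c (List.replicate k x ++ rest)
      = min (k : Int) (c (x - 1))
        + gLoop2 (fupd c (x - 1) (c (x - 1) - min (k : Int) (c (x - 1))))
            (List.replicate (k - (min (k : Int) (c (x - 1))).toNat) x ++ rest) := by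
  intro k
  induction k with
  | zero =>
    intro c x rest hc
    have h0 : min ((0 : Nat) : Int) (c (x - 1)) = 0 := by have := hc (x - 1); omega
    rw [h0]
    simp [fupd_id]
  | succ k ih =>
    intro c x rest hc
    by_cases hpos : 0 < c (x - 1)
    · have hmin : min ((k + 1 : Nat) : Int) (c (x - 1)) = 1 + min (k : Int) (c (x - 1) - 1) := by
        push_cast; omega
      rw [List.replicate_succ, List.cons_append]
      simp only [gLoop2, if_pos hpos]
      set c' := fupd c (x - 1) (c (x - 1) - 1) with hc'
      have hc'nn : ∀ y, 0 ≤ c' y := by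
        intro y; by_cases hy : y = x - 1
        · subst hy; rw [hc', fupd_self]; omega
        · rw [hc', fupd_ne _ _ _ _ hy]; exact hc y
      rw [ih c' x rest hc'nn]
      have hcx : c' (x - 1) = c (x - 1) - 1 := fupd_self _ _ _
      rw [hcx, hc', fupd_fupd]
      have hval : c (x - 1) - 1 - min (k : Int) (c (x - 1) - 1)
          = c (x - 1) - min ((k + 1 : Nat) : Int) (c (x - 1)) := by push_cast; omega
      have hcnt : k - (min (k : Int) (c (x - 1) - 1)).toNat
          = (k + 1) - (min ((k + 1 : Nat) : Int) (c (x - 1))).toNat := by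
        omega
      rw [hval, hcnt, hmin]
      ring
    · have h0 : c (x - 1) = 0 := by have := hc (x - 1); omega
      have hmin : min ((k + 1 : Nat) : Int) (c (x - 1)) = 0 := by rw [h0]; omega
      rw [hmin, sub_zero, fupd_id]
      simp

-- when x-1 is empty, a run of j students at x drains x+1 and then the whole run is consumed
lemma gLoop2_group2 : ∀ (j : Nat) (c : Int → Int) (x : Int) (rest : List Int),
    (∀ y, 0 ≤ c y) → (0 < j → c (x - 1) = 0) →
    gLoop2 c (List.replicate j x ++ rest)
      = min (j : Int) (c (x + 1))
        + gLoop2 (fupd c (x + 1) (c (x + 1) - min (j : Int) (c (x + 1)))) rest := by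
  intro j
  induction j with
  | zero =>
    intro c x rest hc _
    have h0 : min ((0 : Nat) : Int) (c (x + 1)) = 0 := by have := hc (x + 1); omega
    rw [h0]
    simp [fupd_id]
  | succ j ih =>
    intro c x rest hc hx1
    have h1 : c (x - 1) = 0 := hx1 (by omega)
    have hn1 : ¬ 0 < c (x - 1) := by omega
    rw [List.replicate_succ, List.cons_append]
    by_cases hpos : 0 < c (x + 1)
    · simp only [gLoop2, if_neg hn1, if_pos hpos]
      set c' := fupd c (x + 1) (c (x + 1) - 1) with hc'
      have hc'nn : ∀ y, 0 ≤ c' y := by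
        intro y; by_cases hy : y = x + 1
        · subst hy; rw [hc', fupd_self]; omega
        · rw [hc', fupd_ne _ _ _ _ hy]; exact hc y
      have hc'1 : 0 < j → c' (x - 1) = 0 := by
        intro _; rw [hc', fupd_ne _ _ _ _ (by omega)]; exact h1
      rw [ih c' x rest hc'nn hc'1]
      have hcx : c' (x + 1) = c (x + 1) - 1 := fupd_self _ _ _
      rw [hcx, hc', fupd_fupd]
      have hmin : min ((j + 1 : Nat) : Int) (c (x + 1)) = 1 + min (j : Int) (c (x + 1) - 1) := by
        push_cast; omega
      have hval : c (x + 1) - 1 - min (j : Int) (c (x + 1) - 1)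
          = c (x + 1) - min ((j + 1 : Nat) : Int) (c (x + 1)) := by push_cast; omega
      rw [hval, hmin]
      ring
    · have h2 : c (x + 1) = 0 := by have := hc (x + 1); omega
      simp only [gLoop2, if_neg hn1, if_neg hpos]
      rw [ih c x rest hc (fun _ => h1)]
      have hj : min ((j : Nat) : Int) (c (x + 1)) = 0 := by rw [h2]; omega
      have hj1 : min ((j + 1 : Nat) : Int) (c (x + 1)) = 0 := by rw [h2]; omega
      rw [hj, hj1]

-- THE CRUX: B's carry sweep over the remaining distinct values simulates A's per-student greedy
lemma crux : ∀ (vals : List Int) (p : Int) (cn : Nat) (L : List Int) (c : Int → Int) (m : Int),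
    vals.Pairwise (· < ·) →
    (∀ v ∈ vals, p < v) →
    L.Pairwise (· ≤ ·) →
    (∀ x ∈ L, x ∈ vals) →
    (∀ v, 0 ≤ c v) →
    (∀ v, 0 < c v → v ≤ p ∨ v ∈ vals) →
    (∀ x ∈ L, c x = 0) →
    (0 < cn → c (p - 1) = 0 ∧ c p = 0) →
    (fSweep (fun v => (L.count v : Int)) c vals (some p, (cn : Int), c p, m)).2.2.2
      = m + gLoop2 c (List.replicate cn p ++ L) := by
  intro vals
  induction vals with
  | nil =>
    intro p cn L c m _ _ _ hmem hcnn hsupp _ hcp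
    have hL : L = [] := List.eq_nil_iff_forall_not_mem.mpr (fun x hx => by simpa using hmem x hx)
    subst hL
    rw [fSweep_nil]
    rcases Nat.eq_zero_or_pos cn with h0 | hpos
    · subst h0; simp [gLoop2]
    · have h1 : ¬ 0 < c (p - 1) := by rw [(hcp hpos).1]; omega
      have h2 : ¬ 0 < c (p + 1) := by
        intro h
        rcases hsupp _ h with h' | h'
        · omega
        · simp at h'
      rw [gLoop2_skip c p h1 h2]
      simp [gLoop2]
  | cons v vs ih =>
    intro p cn L c m hvals hall hLs hmem hcnn hsupp hdisj hcp
    have hpv : p < v := hall v (by simp)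
    have hvlt : ∀ w ∈ vs, v < w := (List.pairwise_cons.mp hvals).1
    set k := L.count v with hk
    have hmemL : ∀ x ∈ L, x = v ∨ v < x := by
      intro x hx
      rcases List.mem_cons.mp (hmem x hx) with rfl | hx'
      · exact Or.inl rfl
      · exact Or.inr (hvlt x hx')
    have hsplit := split_least L v hLs hmemL
    set L' := L.filter (fun x => decide (v < x)) with hL'
    have hL'mem : ∀ x ∈ L', x ∈ vs := by
      intro x hx
      have hx1 : x ∈ L := List.mem_of_mem_filter hx
      have hx2 : v < x := by
        have := List.of_mem_filter hx
        simpa using this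
      rcases List.mem_cons.mp (hmem x hx1) with rfl | h
      · omega
      · exact h
    have hL's : L'.Pairwise (· ≤ ·) := hLs.filter _
    have hcntL' : ∀ w ∈ vs, L.count w = L'.count w := by
      intro w hw
      have hwv : ¬ w = v := by have := hvlt w hw; omega
      have hwv' : ¬ v = w := fun h => hwv h.symm
      conv_lhs => rw [hsplit]
      rw [List.count_append]
      have h0 : (List.replicate k v).count w = 0 := by
        simp [List.count_replicate, hwv, hwv']
      rw [h0, Nat.zero_add]
    have hkcv : 0 < k → c v = 0 := by
      intro hkp
      exact hdisj v (List.count_pos_iff.mp (by omega))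
    have he : min ((k : Nat) : Int) (c v) = 0 := by
      rcases Nat.eq_zero_or_pos k with h0 | hpos
      · rw [h0]; have := hcnn v; simp; omega
      · rw [hkcv hpos]; omega
    rw [fSweep_cons]
    by_cases hv1 : v - p = 1
    · -- adjacent: carries survive; t1 = min cn (c v), t2 = min k (c p)
      have hstep : fStep (fun w => (L.count w : Int)) c (some p, (cn : Int), c p, m) v
          = (some v, (k : Int) - min (k : Int) (c p), c v - min (cn : Int) (c v),
             m + min (cn : Int) (c v) + min (k : Int) (c p)) := by
        simp only [fStep, carries]
        rw [if_neg (by omega : ¬ (v - p ≠ 1))]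
        rw [← hk, he, sub_zero, sub_zero]
        refine Prod.ext rfl (Prod.ext rfl (Prod.ext rfl ?_))
        ring
      rw [hstep]
      set t1 := min (cn : Int) (c v) with ht1
      set t2 := min (k : Int) (c p) with ht2
      set c1 := fupd c v (c v - t1) with hc1
      set c2 := fupd c1 p (c p - t2) with hc2
      have hc1v : c1 v = c v - t1 := fupd_self _ _ _
      have hc1p : c1 p = c p := fupd_ne _ _ _ _ (by omega)
      have hc2v : c2 v = c v - t1 := by rw [hc2, fupd_ne _ _ _ _ (by omega), hc1v]
      have hc2p : c2 p = c p - t2 := fupd_self _ _ _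
      have hc2other : ∀ w, w ≠ v → w ≠ p → c2 w = c w := by
        intro w h1 h2
        rw [hc2, fupd_ne _ _ _ _ h2, hc1, fupd_ne _ _ _ _ h1]
      have hc1nn : ∀ y, 0 ≤ c1 y := by
        intro y; by_cases hy : y = v
        · rw [hy, hc1v]; have := hcnn v; omega
        · rw [hc1, fupd_ne _ _ _ _ hy]; exact hcnn y
      have hc2nn : ∀ y, 0 ≤ c2 y := by
        intro y; by_cases hy : y = p
        · rw [hy, hc2p]; have := hcnn p; omega
        · rw [hc2, fupd_ne _ _ _ _ hy]; exact hc1nn y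
      -- rewrite A's side: consume the pending run at p, then peel t2 of the run at v
      have hA : gLoop2 c (List.replicate cn p ++ L)
          = t1 + (t2 + gLoop2 c2 (List.replicate (k - t2.toNat) v ++ L')) := by
        conv_lhs => rw [hsplit, ← hk]
        rw [gLoop2_group2 cn c p (List.replicate k v ++ L') hcnn (fun h => (hcp h).1)]
        have hpv1 : p + 1 = v := by omega
        rw [hpv1, ← ht1, ← hc1]
        rw [gLoop2_group1 k c1 v L' hc1nn]
        have hv1p : v - 1 = p := by omega
        rw [hv1p, hc1p, ← ht2, ← hc2]
      -- switch the remaining sweep to the primed data and apply the IH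
      have hcongr := fSweep_congr (fun w => (L.count w : Int)) c
        (fun w => (L'.count w : Int)) c2 vs
        (fun w hw => ⟨by simp [hcntL' w hw], by
          have h1 : w ≠ v := by have := hvlt w hw; omega
          have h2 : w ≠ p := by have := hvlt w hw; omega
          simp [(hc2other w h1 h2).symm]⟩)
      have hih := ih v (k - t2.toNat) L' c2 (m + t1 + t2)
        (List.pairwise_cons.mp hvals).2
        hvlt hL's hL'mem hc2nn
        (by
          intro w hw
          by_cases h1 : w = v
          · exact Or.inl (le_of_eq h1)
          · by_cases h2 : w = p
            · subst h2; exact Or.inl (by omega)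
            · rw [hc2other w h1 h2] at hw
              rcases hsupp w hw with h | h
              · exact Or.inl (by omega)
              · rcases List.mem_cons.mp h with rfl | h'
                · omega
                · exact Or.inr h')
        (by
          intro x hx
          have h1 : x ≠ v := by have := hL'mem x hx; have := hvlt x (hL'mem x hx); omega
          have h2 : x ≠ p := by have := hvlt x (hL'mem x hx); omega
          rw [hc2other x h1 h2]
          exact hdisj x (List.mem_of_mem_filter hx))
        (by
          intro hpos
          have hkt : t2 < (k : Int) := by omega
          have hcv : c v = 0 := hkcv (by omega)
          constructor
          · have : v - 1 = p := by omega
            rw [this, hc2p]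
            have : t2 = c p := by rw [ht2]; omega
            omega
          · rw [hc2v, hcv]
            have : t1 = 0 := by rw [ht1]; have := hcnn v; rw [hcv]; omega
            omega)
      rw [hA, hcongr]
      have hcp0 := hcnn p
      have hcast : (((k - t2.toNat) : Nat) : Int) = (k : Int) - t2 := by omega
      rw [show ((some v : Option Int), (k : Int) - t2, c v - t1, m + t1 + t2)
            = ((some v : Option Int), ((k - t2.toNat : Nat) : Int), c2 v, m + t1 + t2) by
          rw [hcast, hc2v], hih]
      ring
    · -- gap: carries reset; nothing matched at this step
      have hstep : fStep (fun w => (L.count w : Int)) c (some p, (cn : Int), c p, m) v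
          = (some v, (k : Int), c v, m) := by
        simp only [fStep, carries]
        rw [if_pos (by omega : v - p ≠ 1)]
        rw [← hk, he, sub_zero, sub_zero]
        have h1 : min (0 : Int) (c v) = 0 := by have := hcnn v; omega
        have h2 : min ((k : Nat) : Int) (0 : Int) = 0 := by omega
        simp only [h1, h2]
        refine Prod.ext rfl (Prod.ext (by ring) (Prod.ext (by ring) (by ring)))
      rw [hstep]
      have hvp2 : p + 1 < v := by omega
      -- the pending run at p is stuck: both p-1 and p+1 are empty
      have hA : gLoop2 c (List.replicate cn p ++ L) = gLoop2 c L := by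
        rcases Nat.eq_zero_or_pos cn with h0 | hpos
        · subst h0; simp
        · have h1 : ¬ 0 < c (p - 1) := by rw [(hcp hpos).1]; omega
          have h2 : ¬ 0 < c (p + 1) := by
            intro h
            rcases hsupp _ h with h' | h'
            · omega
            · rcases List.mem_cons.mp h' with h'' | h''
              · omega
              · have := hvlt _ h''; omega
          exact gLoop2_skip c p h1 h2 cn L
      have hcongr := fSweep_congr (fun w => (L.count w : Int)) c
        (fun w => (L'.count w : Int)) c vs
        (fun w hw => ⟨by simp [hcntL' w hw], rfl⟩)
      have hih := ih v k L' c m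
        (List.pairwise_cons.mp hvals).2
        hvlt hL's hL'mem hcnn
        (by
          intro w hw
          rcases hsupp w hw with h | h
          · exact Or.inl (by omega)
          · rcases List.mem_cons.mp h with rfl | h'
            · exact Or.inl le_rfl
            · exact Or.inr h')
        (fun x hx => hdisj x (List.mem_of_mem_filter hx))
        (by
          intro hpos
          have hcv : c v = 0 := hkcv hpos
          constructor
          · by_contra h
            have h' : 0 < c (v - 1) := by have := hcnn (v - 1); omega
            rcases hsupp _ h' with h'' | h''
            · omega
            · rcases List.mem_cons.mp h'' with h3 | h3
              · omega
              · have := hvlt _ h3; omega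
          · exact hcv)
      rw [hA, hcongr, hih]
      conv_rhs => rw [hsplit, ← hk]

-- A's second loop on a concrete reserve list equals the abstract greedy on its count function
lemma loop2_gLoop2 : ∀ (L r2 : List Int) (ans : Int),
    solLoop2 L r2 ans = ans + gLoop2 (fun v => (r2.count v : Int)) L := by
  intro L
  induction L with
  | nil => intro r2 ans; simp [solLoop2, gLoop2]
  | cons l ls ih =>
    intro r2 ans
    have hmem : ∀ x : Int, (0 < ((r2.count x : Nat) : Int)) ↔ x ∈ r2 := by
      intro x
      rw [← List.count_pos_iff]
      omega
    have herase : ∀ x : Int, x ∈ r2 →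
        (fun v => (((r2.erase x).count v : Nat) : Int))
          = fupd (fun v => ((r2.count v : Nat) : Int)) x ((r2.count x : Int) - 1) := by
      intro x hx
      funext y
      by_cases hy : y = x
      · subst hy
        rw [fupd_self, List.count_erase_self]
        have : 0 < r2.count y := List.count_pos_iff.mpr hx
        omega
      · rw [fupd_ne _ _ _ _ hy, List.count_erase_of_ne hy]
    by_cases h1 : (l - 1) ∈ r2
    · have hb : 0 < ((r2.count (l - 1) : Nat) : Int) := (hmem _).mpr h1
      simp only [solLoop2, gLoop2, if_pos h1, if_pos hb,
        PySem.List.remove?_eq_some_erase r2 _ h1, Option.getD_some]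
      rw [ih, herase _ h1]
      ring
    · have hb : ¬ 0 < ((r2.count (l - 1) : Nat) : Int) := fun h => h1 ((hmem _).mp h)
      by_cases h2 : (l + 1) ∈ r2
      · have hb2 : 0 < ((r2.count (l + 1) : Nat) : Int) := (hmem _).mpr h2
        simp only [solLoop2, gLoop2, if_neg h1, if_neg hb, if_pos h2, if_pos hb2,
          PySem.List.remove?_eq_some_erase r2 _ h2, Option.getD_some]
        rw [ih, herase _ h2]
        ring
      · have hb2 : ¬ 0 < ((r2.count (l + 1) : Nat) : Int) := fun h => h2 ((hmem _).mp h)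
        simp only [solLoop2, gLoop2, if_neg h1, if_neg hb, if_neg h2, if_neg hb2]
        exact ih r2 ans

-- removing l from kept ++ l :: ls removes exactly that head occurrence when l does not occur in kept
lemma remove?_append_cons_self (kept ls : List Int) (l : Int) (h : l ∉ kept) :
    PySem.List.remove? (kept ++ l :: ls) l = some (kept ++ ls) := by
  induction kept with
  | nil => simp
  | cons k ks ih =>
    have hk : k ≠ l := fun he => h (by simp [he])
    have hks : l ∉ ks := fun hm => h (by simp [hm])
    rw [List.cons_append, PySem.List.remove?_cons_of_ne (ks ++ l :: ls) hk, ih hks]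
    rfl

-- characterisation of A's first loop: exact matches cancel, the rest queue up in order
lemma loop1_char (reserve : List Int) : ∀ (ls kept r2 : List Int) (ans : Int),
    (∀ v ∈ reserve, ls.count v ≤ r2.count v) →
    (∀ v ∈ kept, v ∉ reserve) →
    ∃ r2' : List Int,
      solLoop1 reserve ls (kept ++ ls) r2 ans =
        (kept ++ ls.filter (fun l => decide (l ∉ reserve)), r2',
         ans + ((ls.filter (fun l => decide (l ∈ reserve))).length : Int)) ∧
      ∀ v, (r2'.count v : Int)
        = (r2.count v : Int) - ((ls.filter (fun l => decide (l ∈ reserve))).count v : Int) := by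
  intro ls
  induction ls with
  | nil =>
    intro kept r2 ans _ _
    exact ⟨r2, by simp [solLoop1], by intro v; simp⟩
  | cons l ls ih =>
    intro kept r2 ans hcnt hkept
    by_cases hl : l ∈ reserve
    · have hle : (l :: ls).count l ≤ r2.count l := hcnt l hl
      have hpos : 0 < r2.count l := by
        have : 0 < (l :: ls).count l := by simp [List.count_cons_self]
        omega
      have hlr2 : l ∈ r2 := List.count_pos_iff.mp hpos
      have hlk : l ∉ kept := fun h => hkept l h hl
      have hcnt' : ∀ v ∈ reserve, ls.count v ≤ (r2.erase l).count v := by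
        intro v hv
        have h := hcnt v hv
        rw [List.count_cons] at h
        by_cases hvl : v = l
        · subst hvl
          rw [List.count_erase_self]
          simp at h
          omega
        · rw [List.count_erase_of_ne hvl]
          simp [hvl] at h
          omega
      obtain ⟨r2', hA, hC⟩ := ih kept (r2.erase l) (ans + 1) hcnt' hkept
      refine ⟨r2', ?_, ?_⟩
      · simp only [solLoop1, if_pos hl, PySem.List.remove?_eq_some_erase r2 _ hlr2,
          remove?_append_cons_self kept ls l hlk]
        rw [hA]
        have hfil1 : (l :: ls).filter (fun x => decide (x ∉ reserve))
            = ls.filter (fun x => decide (x ∉ reserve)) := by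
          simp [List.filter_cons, hl]
        have hfil2 : (l :: ls).filter (fun x => decide (x ∈ reserve))
            = l :: ls.filter (fun x => decide (x ∈ reserve)) := by
          simp [List.filter_cons, hl]
        rw [hfil1, hfil2]
        refine congrArg _ (congrArg _ ?_)
        simp only [List.length_cons]
        push_cast
        ring
      · intro v
        rw [hC v]
        have hfil2 : (l :: ls).filter (fun x => decide (x ∈ reserve))
            = l :: ls.filter (fun x => decide (x ∈ reserve)) := by
          simp [List.filter_cons, hl]
        rw [hfil2, List.count_cons]
        by_cases hvl : v = l
        · subst hvl
          rw [List.count_erase_self]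
          simp
          omega
        · have hlv : ¬ l = v := fun h => hvl h.symm
          rw [List.count_erase_of_ne hvl]
          simp [hvl, hlv]
    · have hkept' : ∀ v ∈ kept ++ [l], v ∉ reserve := by
        intro v hv
        rcases List.mem_append.mp hv with h | h
        · exact hkept v h
        · simp at h; subst h; exact hl
      have hcnt' : ∀ v ∈ reserve, ls.count v ≤ r2.count v := by
        intro v hv
        have h := hcnt v hv
        rw [List.count_cons] at h
        omega
      obtain ⟨r2', hA, hC⟩ := ih (kept ++ [l]) r2 ans hcnt' hkept'
      refine ⟨r2', ?_, ?_⟩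
      · simp only [solLoop1, if_neg hl]
        have heq : kept ++ l :: ls = (kept ++ [l]) ++ ls := by simp
        rw [heq, hA]
        have hfil1 : (l :: ls).filter (fun x => decide (x ∉ reserve))
            = l :: ls.filter (fun x => decide (x ∉ reserve)) := by
          simp [List.filter_cons, hl]
        have hfil2 : (l :: ls).filter (fun x => decide (x ∈ reserve))
            = ls.filter (fun x => decide (x ∈ reserve)) := by
          simp [List.filter_cons, hl]
        rw [hfil1, hfil2]
        simp
      · intro v
        rw [hC v]
        have hfil2 : (l :: ls).filter (fun x => decide (x ∈ reserve))
            = ls.filter (fun x => decide (x ∈ reserve)) := by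
          simp [List.filter_cons, hl]
        rw [hfil2]

-- summing the multiplicities over a duplicate-free list of all values gives the length
lemma sum_count : ∀ (vals : List Int) (l : List Int), vals.Nodup → (∀ x ∈ l, x ∈ vals) →
    (vals.map (fun v => (l.count v : Int))).sum = (l.length : Int) := by
  intro vals
  induction vals with
  | nil =>
    intro l _ hmem
    have hl : l = [] := List.eq_nil_iff_forall_not_mem.mpr (fun x hx => by simpa using hmem x hx)
    subst hl
    simp
  | cons v vs ih =>
    intro l hnd hmem
    have hnd' := (List.nodup_cons.mp hnd).2
    have hvnot := (List.nodup_cons.mp hnd).1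
    set l' := l.filter (fun x => decide (x ≠ v)) with hl'
    have hlen : l.length = l.count v + l'.length := by
      have h1 := List.length_eq_countP_add_countP (p := fun x => decide (x = v)) (l := l)
      have h2 : List.countP (fun x => decide (x = v)) l = l.count v := by
        rw [List.count_eq_countP]
        exact List.countP_congr (fun a _ => by by_cases h : a = v <;> simp [h])
      have h3 : l'.length = List.countP (fun x => decide (x ≠ v)) l := by
        rw [hl']; exact List.countP_eq_length_filter.symm
      have h4 : List.countP (fun a => decide ¬decide (a = v) = true) l
          = List.countP (fun x => decide (x ≠ v)) l :=
        List.countP_congr (fun a _ => by simp)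
      omega
    have hcong : ∀ w ∈ vs, (l.count w : Int) = (l'.count w : Int) := by
      intro w hw
      have hwv : w ≠ v := fun h => hvnot (h ▸ hw)
      rw [hl', List.count_filter (by simpa using hwv)]
    have hmem' : ∀ x ∈ l', x ∈ vs := by
      intro x hx
      have h1 : x ∈ l := List.mem_of_mem_filter hx
      have h2 : x ≠ v := by have := List.of_mem_filter hx; simpa using this
      rcases List.mem_cons.mp (hmem x h1) with h | h
      · exact absurd h h2
      · exact h
    rw [List.map_cons, List.sum_cons]
    rw [List.map_congr_left hcong, ih l' hnd' hmem']
    rw [hlen]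
    push_cast
    ring

-- assembly: A = B on every input Pre_ admits
lemma solution_eq_alt (n : Int) (lost reserve : List Int)
    (hpre : Pre_solution n lost reserve) :
    solution n lost reserve = solution_alt n lost reserve := by
  set lostS := PySem.List.sorted lost (fun x => x) false with hlostS
  set reserveS := PySem.List.sorted reserve (fun x => x) false with hreserveS
  set EF := lostS.filter (fun l => decide (l ∈ reserveS)) with hEF
  set L2 := lostS.filter (fun l => decide (l ∉ reserveS)) with hL2
  have hpermL := PySem.List.sorted_perm lost (fun x => x) false
  have hpermR := PySem.List.sorted_perm reserve (fun x => x) false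
  rw [← hlostS] at hpermL
  rw [← hreserveS] at hpermR
  have hpreS : ∀ v ∈ reserveS, lostS.count v ≤ reserveS.count v := by
    intro v hv
    rw [hpermL.count_eq, hpermR.count_eq]
    exact hpre v (hpermR.mem_iff.mp hv)
  -- ===== A side =====
  obtain ⟨r2', hA, hC⟩ :=
    loop1_char reserveS lostS [] reserveS (n - (lostS.length : Int)) hpreS (by simp)
  simp only [List.nil_append] at hA
  rw [← hEF, ← hL2] at hA
  rw [← hEF] at hC
  have hAside : solution n lost reserve
      = n - (lostS.length : Int) + (EF.length : Int)
        + gLoop2 (fun v => ((r2'.count v : Nat) : Int)) L2 := by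
    show (match solLoop1 reserveS lostS lostS reserveS (n - (lostS.length : Int)) with
          | (lost2, reserve2, answer) => solLoop2 lost2 reserve2 answer) = _
    rw [hA]
    show solLoop2 L2 r2' (n - (lostS.length : Int) + (EF.length : Int)) = _
    rw [loop2_gLoop2]
  -- ===== B side: unfold the port to the abstract sweep =====
  set vals := PySem.List.sorted
      (PySem.Set.union (PySem.Set.ofList lostS) (PySem.Set.ofList reserveS))
      (fun x => x) false with hvals
  have hBside : solution_alt n lost reserve
      = n - (lostS.length : Int)
        + (fSweep (fun v => ((lostS.count v : Nat) : Int))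
            (fun v => ((reserveS.count v : Nat) : Int)) vals (none, 0, 0, 0)).2.2.2 := by
    simp only [solution_alt]
    rw [← hlostS, ← hreserveS]
    rw [PySem.Dict.foldl_insert_getD_add_one_eq_counter,
        PySem.Dict.foldl_insert_getD_add_one_eq_counter,
        PySem.Dict.keys_counter, PySem.Dict.keys_counter, sweepStep_eq_fStep]
    have hgetL : (fun v => (PySem.Dict.counter lostS).getD v 0)
        = fun v => ((lostS.count v : Nat) : Int) := funext (PySem.Dict.getD_counter lostS)
    have hgetR : (fun v => (PySem.Dict.counter reserveS).getD v 0)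
        = fun v => ((reserveS.count v : Nat) : Int) := funext (PySem.Dict.getD_counter reserveS)
    rw [hgetL, hgetR]
    rfl
  -- ===== facts about vals =====
  have hvle : vals.Pairwise (· ≤ ·) := PySem.List.sorted_pairwise _ (fun x => x)
  have hvnd : vals.Nodup := by
    have h0 : (PySem.Set.union (PySem.Set.ofList lostS) (PySem.Set.ofList reserveS)).Nodup :=
      PySem.Set.nodup_union _ _ (PySem.Set.nodup_ofList lostS)
    exact (PySem.List.sorted_perm _ _ _).nodup_iff.mpr h0
  have hvp : vals.Pairwise (· < ·) :=
    (hvle.and hvnd).imp (fun h => lt_of_le_of_ne h.1 h.2)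
  have hvmem : ∀ x, x ∈ vals ↔ x ∈ lostS ∨ x ∈ reserveS := by
    intro x
    rw [hvals, PySem.List.mem_sorted, PySem.Set.mem_union]
    simp [PySem.Set.mem_ofList]
  -- ===== counting facts =====
  have hEFcount : ∀ v, v ∈ reserveS → EF.count v = lostS.count v := by
    intro v hv
    exact List.count_filter (by simpa using hv)
  have hEFzero : ∀ v, v ∉ reserveS → EF.count v = 0 := by
    intro v hv
    rw [List.count_eq_zero]
    intro hmem
    exact hv (by simpa using List.of_mem_filter hmem)
  have hRzero : ∀ v, v ∉ reserveS → reserveS.count v = 0 := fun v hv => List.count_eq_zero.mpr hv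
  have hminEF : ∀ v, min ((lostS.count v : Nat) : Int) ((reserveS.count v : Nat) : Int)
      = ((EF.count v : Nat) : Int) := by
    intro v
    by_cases hv : v ∈ reserveS
    · have h := hpreS v hv
      rw [hEFcount v hv]
      omega
    · rw [hEFzero v hv, hRzero v hv]
      have : (0 : Int) ≤ ((lostS.count v : Nat) : Int) := Int.natCast_nonneg _
      omega
  have hL2count : ∀ v, v ∉ reserveS → L2.count v = lostS.count v := by
    intro v hv
    exact List.count_filter (by simpa using hv)
  have hL2zero : ∀ v, v ∈ reserveS → L2.count v = 0 := by
    intro v hv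
    rw [List.count_eq_zero]
    intro hmem
    exact (by simpa using List.of_mem_filter hmem : v ∉ reserveS) hv
  -- ===== apply the exact-match split to the sweep =====
  have hsplit1 := fSweep_esplit (fun v => ((lostS.count v : Nat) : Int))
      (fun v => ((reserveS.count v : Nat) : Int))
      (fun v => Int.natCast_nonneg _) (fun v => Int.natCast_nonneg _) vals none 0 0 0
  beta_reduce at hsplit1
  have hsum : (vals.map (fun v => min ((lostS.count v : Nat) : Int)
        ((reserveS.count v : Nat) : Int))).sum = (EF.length : Int) := by
    rw [List.map_congr_left (fun v _ => hminEF v)]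
    exact sum_count vals EF hvnd
      (fun x hx => (hvmem x).mpr (Or.inl (List.mem_of_mem_filter hx)))
  have hN' : (fun v => ((lostS.count v : Nat) : Int)
        - min ((lostS.count v : Nat) : Int) ((reserveS.count v : Nat) : Int))
      = fun v => ((L2.count v : Nat) : Int) := by
    funext v
    rw [hminEF v]
    by_cases hv : v ∈ reserveS
    · rw [hL2zero v hv, hEFcount v hv]
      omega
    · rw [hL2count v hv, hEFzero v hv]
      omega
  have hS' : (fun v => ((reserveS.count v : Nat) : Int)
        - min ((lostS.count v : Nat) : Int) ((reserveS.count v : Nat) : Int))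
      = fun v => ((r2'.count v : Nat) : Int) := by
    funext v
    rw [hminEF v, hC v]
  -- ===== the reduced sweep equals A's greedy =====
  have hc2nn : ∀ v, (0 : Int) ≤ ((r2'.count v : Nat) : Int) := fun v => Int.natCast_nonneg _
  have hc2disj : ∀ x ∈ L2, ((r2'.count x : Nat) : Int) = 0 := by
    intro x hx
    have hxn : x ∉ reserveS := by simpa using List.of_mem_filter hx
    rw [hC x, hRzero x hxn, hEFzero x hxn]
    simp
  have hc2supp : ∀ v, 0 < ((r2'.count v : Nat) : Int) → v ∈ vals := by
    intro v h
    have h1 := hC v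
    have h2 : (0 : Int) ≤ ((EF.count v : Nat) : Int) := Int.natCast_nonneg _
    have hr : 0 < reserveS.count v := by omega
    exact (hvmem v).mpr (Or.inr (List.count_pos_iff.mp hr))
  have hL2s : L2.Pairwise (· ≤ ·) := by
    have := PySem.List.sorted_pairwise lost (fun x => x)
    rw [← hlostS] at this
    exact this.filter _
  have hL2mem : ∀ x ∈ L2, x ∈ vals :=
    fun x hx => (hvmem x).mpr (Or.inl (List.mem_of_mem_filter hx))
  have hfin : (fSweep (fun v => ((L2.count v : Nat) : Int))
        (fun v => ((r2'.count v : Nat) : Int)) vals (none, 0, 0, 0)).2.2.2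
      = gLoop2 (fun v => ((r2'.count v : Nat) : Int)) L2 := by
    rcases hvq : vals with _ | ⟨v0, vs⟩
    · have hL2nil : L2 = [] := List.eq_nil_iff_forall_not_mem.mpr
        (fun x hx => by have := hL2mem x hx; rw [hvq] at this; simp at this)
      rw [hL2nil]
      simp [fSweep_nil, gLoop2]
    · have hvp' : (v0 :: vs).Pairwise (· < ·) := hvq ▸ hvp
      have hvlt0 : ∀ w ∈ vs, v0 < w := (List.pairwise_cons.mp hvp').1
      have hL2memL : ∀ x ∈ L2, x = v0 ∨ v0 < x := by
        intro x hx
        have hxv := hL2mem x hx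
        rw [hvq] at hxv
        rcases List.mem_cons.mp hxv with rfl | h
        · exact Or.inl rfl
        · exact Or.inr (hvlt0 x h)
      set k0 := L2.count v0 with hk0
      have hsplit2 := split_least L2 v0 hL2s hL2memL
      set L2' := L2.filter (fun x => decide (v0 < x)) with hL2'
      have hL2'mem : ∀ x ∈ L2', x ∈ vs := by
        intro x hx
        have hx1 : x ∈ L2 := List.mem_of_mem_filter hx
        have hx2 : v0 < x := by have := List.of_mem_filter hx; simpa using this
        have hxv := hL2mem x hx1
        rw [hvq] at hxv
        rcases List.mem_cons.mp hxv with rfl | h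
        · omega
        · exact h
      have hk0cv : 0 < k0 → ((r2'.count v0 : Nat) : Int) = 0 := by
        intro h
        exact hc2disj v0 (List.count_pos_iff.mp (by omega))
      have he0 : min ((k0 : Nat) : Int) ((r2'.count v0 : Nat) : Int) = 0 := by
        rcases Nat.eq_zero_or_pos k0 with h0 | hpos
        · rw [h0]; have := hc2nn v0; omega
        · rw [hk0cv hpos]; omega
      have hstep0 : fStep (fun v => ((L2.count v : Nat) : Int))
            (fun v => ((r2'.count v : Nat) : Int)) (none, 0, 0, 0) v0
          = (some v0, ((k0 : Nat) : Int), ((r2'.count v0 : Nat) : Int), 0) := by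
        simp only [fStep, carries]
        rw [← hk0]
        simp only [Prod.mk.injEq]
        refine ⟨trivial, ?_, ?_, ?_⟩ <;>
          (have h1 := hc2nn v0; have h2 : (0 : Int) ≤ ((k0 : Nat) : Int) := Int.natCast_nonneg _;
           have h3 := he0; omega)
      rw [fSweep_cons, hstep0]
      have hcntL2' : ∀ w ∈ vs, L2.count w = L2'.count w := by
        intro w hw
        have hwv : ¬ w = v0 := by have := hvlt0 w hw; omega
        have hwv' : ¬ v0 = w := fun h => hwv h.symm
        conv_lhs => rw [hsplit2, ← hk0]
        rw [List.count_append]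
        have h0 : (List.replicate k0 v0).count w = 0 := by
          simp [List.count_replicate, hwv, hwv']
        rw [h0, Nat.zero_add]
      have hcongr2 := fSweep_congr (fun w => ((L2.count w : Nat) : Int))
        (fun v => ((r2'.count v : Nat) : Int))
        (fun w => ((L2'.count w : Nat) : Int))
        (fun v => ((r2'.count v : Nat) : Int)) vs
        (fun w hw => ⟨by simp [hcntL2' w hw], rfl⟩)
      rw [hcongr2]
      have hcx := crux vs v0 k0 L2'
        (fun v => ((r2'.count v : Nat) : Int)) 0
        (List.pairwise_cons.mp hvp').2
        hvlt0 (hL2s.filter _) hL2'mem hc2nn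
        (by
          intro w hw
          have hwv := hc2supp w hw
          rw [hvq] at hwv
          rcases List.mem_cons.mp hwv with rfl | h
          · exact Or.inl le_rfl
          · exact Or.inr h)
        (fun x hx => hc2disj x (List.mem_of_mem_filter hx))
        (by
          intro hpos
          constructor
          · show ((r2'.count (v0 - 1) : Nat) : Int) = 0
            by_contra h
            have h' : 0 < ((r2'.count (v0 - 1) : Nat) : Int) := by
              have := hc2nn (v0 - 1); omega
            have hwv := hc2supp _ h'
            rw [hvq] at hwv
            rcases List.mem_cons.mp hwv with h'' | h''
            · omega
            · have := hvlt0 _ h''; omega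
          · show ((r2'.count v0 : Nat) : Int) = 0
            exact hk0cv hpos)
      rw [hcx]
      conv_rhs => rw [hsplit2, ← hk0]
      ring
  rw [hAside, hBside, hsplit1, hsum, hN', hS', hfin]
  ring

-- ===== VERDICT (by name: the statement is the Claim_ definition above) =====
theorem solution_spec : Claim_equal_solution := by
  intro n lost reserve _ hpre
  exact solution_eq_alt n lost reserve hpre
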